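-- pv_equiv track=rewrite | github.com/vincenzorm117/CCI_6edition | problems/chapter8/9_parens/python/solution.py | parensBookSolutionIterative
-- ===== SOURCE A (Python) =====
-- def parensBookSolutionIterative(count):
--     parenList = []
--     stack = [(count, count, '', 0)]
--     while 0 < len(stack):
--         leftRem, rightRem, currStr, index = stack.pop()
--
--         if leftRem < 0 or rightRem < 0 or leftRem > rightRem:
--             continue
--         elif leftRem == 0 and rightRem == 0:
--             parenList.append(currStr)
--         else:
--             stack.append((leftRem - 1, rightRem, currStr + '(', index+1))
--             stack.append((leftRem, rightRem - 1, currStr + ')', index+1))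
--
--     return (count, len(parenList), parenList)
-- ===== SOURCE B (Python) =====
-- def parensBookSolutionIterative(count):
--     if count < 0:
--         return (count, 0, [])
--     # row[l] = all suffixes that complete a prefix still owing l '(' and r ')' (l <= r),
--     # built bottom-up for r = 0..count; ')' alternatives come before '(' alternatives.
--     row = [['']]
--     for r in range(1, count + 1):
--         new = [[')' + s for s in row[0]]]
--         for l in range(1, r + 1):
--             closers = [')' + s for s in row[l]] if l < r else []
--             new.append(closers + ['(' + s for s in new[l - 1]])
--         row = new
--     parenList = row[count]
--     return (count, len(parenList), parenList)
-- ===== Notes on version B (the rewrite author's own statement) =====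
-- stated objective: alternative
-- what changed: Replaced A's explicit DFS worklist of (leftRem, rightRem, currStr, index) tuples with an iterative bottom-up dynamic program: row[l] holds all valid suffixes still owing l '(' and r ')' (')'-alternatives before '('-alternatives, matching the stack's LIFO visit order), and the answer is the table entry row[count].
import Mathlib
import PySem

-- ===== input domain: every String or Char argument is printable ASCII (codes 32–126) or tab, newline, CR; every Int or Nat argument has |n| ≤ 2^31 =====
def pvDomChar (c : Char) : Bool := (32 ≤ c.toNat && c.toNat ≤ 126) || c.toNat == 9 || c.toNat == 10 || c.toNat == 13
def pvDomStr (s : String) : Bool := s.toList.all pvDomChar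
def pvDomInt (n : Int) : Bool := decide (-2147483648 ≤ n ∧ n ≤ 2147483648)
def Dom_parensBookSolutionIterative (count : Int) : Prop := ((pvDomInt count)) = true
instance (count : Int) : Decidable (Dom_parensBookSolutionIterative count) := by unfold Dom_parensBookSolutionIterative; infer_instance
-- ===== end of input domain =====

-- B replaces A's explicit DFS stack with an iterative bottom-up DP over suffix tables
-- (row[l] = completions owing l '(' and r ')'); objective: alternative algorithm.

-- ===== PORT A =====
-- measure used only for the termination of A's stack loop
def pvMeasureA : List (Int × Int × String × Int) → Nat
  | [] => 0
  | (l, r, _, _) :: rest => 3 ^ (l + r).toNat + pvMeasureA rest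

lemma pvMeasureA_pos_head (l r : Int) (s : String) (i : Int)
    (rest : List (Int × Int × String × Int)) :
    pvMeasureA rest < pvMeasureA ((l, r, s, i) :: rest) := by
  have h3 : 0 < 3 ^ (l + r).toNat := pow_pos (by norm_num : (0:ℕ) < 3) _
  simp [pvMeasureA]

lemma pvMeasureA_split (l r : Int) (s t u : String) (i j k : Int)
    (rest : List (Int × Int × String × Int))
    (hl : 0 ≤ l) (hr : 0 ≤ r) (hlr : ¬ (l = 0 ∧ r = 0)) :
    pvMeasureA ((l, r - 1, s, i) :: (l - 1, r, t, j) :: rest)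
      < pvMeasureA ((l, r, u, k) :: rest) := by
  have hn : (l + r).toNat = (l + (r - 1)).toNat + 1 ∧ (l - 1 + r).toNat = (l + (r - 1)).toNat := by
    omega
  have hpow : 3 ^ (l + r).toNat = 3 * 3 ^ (l + (r - 1)).toNat := by
    rw [hn.1, pow_succ]; ring
  have h3 : 0 < 3 ^ (l + (r - 1)).toNat := pow_pos (by norm_num : (0:ℕ) < 3) _
  simp only [pvMeasureA, hn.2, hpow]; omega

-- the while-loop of A: pops the head, pushes ')' on top of '(' (Python appends '(' then ')')
def pvLoopA : List (Int × Int × String × Int) → List String → List String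
  | [], acc => acc
  | (l, r, cur, idx) :: rest, acc =>
    if l < 0 ∨ r < 0 ∨ l > r then pvLoopA rest acc
    else if l = 0 ∧ r = 0 then pvLoopA rest (acc ++ [cur])
    else pvLoopA ((l, r - 1, cur ++ ")", idx + 1) :: (l - 1, r, cur ++ "(", idx + 1) :: rest) acc
  termination_by s _ => pvMeasureA s
  decreasing_by
  · exact pvMeasureA_pos_head _ _ _ _ _
  · exact pvMeasureA_pos_head _ _ _ _ _
  · exact pvMeasureA_split _ _ _ _ _ _ _ _ _ (by omega) (by omega) (by tauto)

def parensBookSolutionIterative (count : Int) : Int × Int × List String :=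
  let parenList := pvLoopA [(count, count, "", 0)] []
  (count, (parenList.length : Int), parenList)

-- ===== PORT B =====
-- B: bottom-up DP; row[l] lists the suffixes owing l '(' and r ')' (list indexing row[l]
-- is always in range in the Python, ported as the total lookup pyGetD with default [])
def parensBookSolutionIterative_alt (count : Int) : Int × Int × List String :=
  if count < 0 then (count, 0, [])
  else
    let row := (PySem.List.pyRange 1 (count + 1) 1).foldl (fun row r =>
        (PySem.List.pyRange 1 (r + 1) 1).foldl (fun new l =>
            new ++ [(if l < r then (PySem.List.pyGetD row l []).map (fun s => ")" ++ s) else [])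
              ++ (PySem.List.pyGetD new (l - 1) []).map (fun s => "(" ++ s)])
          [(PySem.List.pyGetD row 0 []).map (fun s => ")" ++ s)]) [[""]]
    let parenList := PySem.List.pyGetD row count []
    (count, (parenList.length : Int), parenList)

-- ===== PRECONDITION & SPEC =====
def Spec_parensBookSolutionIterative (count : Int) (out : Int × Int × List String) : Prop := out = parensBookSolutionIterative_alt count
instance (count : Int) (out : Int × Int × List String) : Decidable (Spec_parensBookSolutionIterative count out) := by unfold Spec_parensBookSolutionIterative; infer_instance

-- ===== CLAIM (what is proved, stated in full; the proofs are below) =====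
def Claim_equal_parensBookSolutionIterative : Prop := ∀ (count : Int), Dom_parensBookSolutionIterative count → Spec_parensBookSolutionIterative count (parensBookSolutionIterative count)

-- ===== LEMMAS AND PROOFS =====

-- the suffix table: pvG l r = all valid completions still owing l '(' and r ')'
def pvG (l r : Int) : List String :=
  if l < 0 ∨ r < 0 ∨ l > r then []
  else if l = 0 ∧ r = 0 then [""]
  else (pvG l (r - 1)).map (fun s => ")" ++ s) ++ (pvG (l - 1) r).map (fun s => "(" ++ s)
  termination_by (l + r).toNat
  decreasing_by all_goals omega

-- the recursive form of A's DFS (proof intermediary between the stack loop and the DP)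
def pvRecB (l r : Int) (cur : String) (acc : List String) : List String :=
  if l < 0 ∨ r < 0 ∨ l > r then acc
  else if l = 0 ∧ r = 0 then acc ++ [cur]
  else pvRecB (l - 1) r (cur ++ "(") (pvRecB l (r - 1) (cur ++ ")") acc)
  termination_by (l + r).toNat
  decreasing_by all_goals omega

lemma recB_eq_G : ∀ (l r : Int) (cur : String) (acc : List String),
    pvRecB l r cur acc = acc ++ (pvG l r).map (fun s => cur ++ s) := by
  intro l r cur acc
  induction l, r using pvG.induct generalizing cur acc with
  | case1 l r h => rw [pvRecB, pvG]; simp [h]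
  | case2 l r h h2 => rw [pvRecB, pvG]; simp [h2]
  | case3 l r h h2 ih1 ih2 =>
    rw [pvRecB, if_neg h, if_neg h2, pvG, if_neg h, if_neg h2, ih1, ih2]
    simp [List.map_map, Function.comp_def, String.append_assoc]

-- popping one frame of the stack computes exactly the DFS recursion on that frame
lemma loopA_cons : ∀ (n : Nat) (l r : Int) (cur : String) (idx : Int)
    (rest : List (Int × Int × String × Int)) (acc : List String),
    pvMeasureA ((l, r, cur, idx) :: rest) = n →
    pvLoopA ((l, r, cur, idx) :: rest) acc = pvLoopA rest (pvRecB l r cur acc) := by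
  intro n
  induction n using Nat.strong_induction_on with
  | _ n ih =>
    intro l r cur idx rest acc hm
    rw [pvLoopA, pvRecB]
    by_cases h1 : l < 0 ∨ r < 0 ∨ l > r
    · simp [h1]
    · by_cases h2 : l = 0 ∧ r = 0
      · simp [h2]
      · simp only [if_neg h1, if_neg h2]
        have hd1 := pvMeasureA_split l r (cur ++ ")") (cur ++ "(") cur (idx + 1) (idx + 1) idx rest
          (by omega) (by omega) h2
        have hd2 : pvMeasureA ((l - 1, r, cur ++ "(", idx + 1) :: rest)
            < pvMeasureA ((l, r, cur, idx) :: rest) := by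
          have := pvMeasureA_pos_head l (r - 1) (cur ++ ")") (idx + 1)
            ((l - 1, r, cur ++ "(", idx + 1) :: rest)
          omega
        rw [ih _ (by omega) l (r - 1) (cur ++ ")") (idx + 1) _ acc rfl,
            ih _ (by omega) (l - 1) r (cur ++ "(") (idx + 1) rest _ rfl]

lemma loopA_eq_G (count : Int) :
    pvLoopA [(count, count, "", 0)] [] = pvG count count := by
  rw [loopA_cons (pvMeasureA [(count, count, "", 0)]) count count "" 0 [] [] rfl, pvLoopA,
      recB_eq_G]
  simp

-- indexing a table of the shape (List.range n).map f
lemma pyGetD_map_range (f : Nat → List String) (n : Nat) (i : Int)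
    (h0 : 0 ≤ i) (h : i.toNat < n) :
    PySem.List.pyGetD ((List.range n).map f) i [] = f i.toNat := by
  have hi : i = ((i.toNat : Nat) : Int) := by omega
  rw [hi, PySem.List.pyGetD_natCast]
  simp [List.getD, h]
  congr 1
  omega

-- one pass of the inner loop, started at any l = k ≥ 1
lemma inner_aux (r : Int) (hr : 1 ≤ r) (row : List (List String))
    (hrow : row = (List.range r.toNat).map (fun (j : Nat) => pvG (j : Int) (r - 1))) :
    ∀ (d k : Nat), 1 ≤ k → k + d = r.toNat + 1 →
    (PySem.List.pyRange (k : Int) (r + 1) 1).foldl (fun new l =>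
        new ++ [(if l < r then (PySem.List.pyGetD row l []).map (fun s => ")" ++ s) else [])
          ++ (PySem.List.pyGetD new (l - 1) []).map (fun s => "(" ++ s)])
      ((List.range k).map (fun (j : Nat) => pvG (j : Int) r))
    = (List.range (r.toNat + 1)).map (fun (j : Nat) => pvG (j : Int) r) := by
  intro d
  induction d with
  | zero =>
    intro k h1 hk
    rw [PySem.List.pyRange_one_eq_nil (by omega)]
    simp only [List.foldl_nil]
    have : k = r.toNat + 1 := by omega
    rw [this]
  | succ d ihd =>
    intro k h1 hk
    rw [PySem.List.pyRange_one_cons (by omega : (k : Int) < r + 1)]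
    simp only [List.foldl_cons]
    have hidx : PySem.List.pyGetD ((List.range k).map (fun (j : Nat) => pvG (j : Int) r)) ((k : Int) - 1) []
        = pvG (((k - 1 : Nat) : Nat) : Int) r := by
      rw [pyGetD_map_range _ _ _ (by omega) (by omega)]
      congr 1; omega
    have hX : (if (k : Int) < r then (PySem.List.pyGetD row (k : Int) []).map (fun s => ")" ++ s) else [])
        ++ (PySem.List.pyGetD ((List.range k).map (fun (j : Nat) => pvG (j : Int) r)) ((k : Int) - 1) []).map (fun s => "(" ++ s)
        = pvG (k : Int) r := by
      rw [pvG, if_neg (by omega : ¬((k : Int) < 0 ∨ r < 0 ∨ (k : Int) > r)),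
          if_neg (by omega : ¬((k : Int) = 0 ∧ r = 0))]
      congr 1
      · by_cases hlt : (k : Int) < r
        · rw [if_pos hlt, hrow, pyGetD_map_range _ _ _ (by omega) (by omega)]
          congr 2
        · rw [if_neg hlt]
          have hkr : pvG (k : Int) (r - 1) = [] := by
            rw [pvG, if_pos (by omega)]
          rw [hkr]; simp
      · rw [hidx]
        congr 2; omega
    rw [hX]
    have hrange : ((List.range k).map (fun (j : Nat) => pvG (j : Int) r)) ++ [pvG (k : Int) r]
        = (List.range (k + 1)).map (fun (j : Nat) => pvG (j : Int) r) := by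
      rw [List.range_succ, List.map_append]
      simp
    rw [hrange]
    have h2 := ihd (k + 1) (by omega) (by omega)
    push_cast at h2 ⊢
    exact h2

-- the inner loop fills one row of the DP table
lemma inner_loop (r : Int) (hr : 1 ≤ r) (row : List (List String))
    (hrow : row = (List.range r.toNat).map (fun (j : Nat) => pvG (j : Int) (r - 1))) :
    (PySem.List.pyRange 1 (r + 1) 1).foldl (fun new l =>
        new ++ [(if l < r then (PySem.List.pyGetD row l []).map (fun s => ")" ++ s) else [])
          ++ (PySem.List.pyGetD new (l - 1) []).map (fun s => "(" ++ s)])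
      [(PySem.List.pyGetD row 0 []).map (fun s => ")" ++ s)]
    = (List.range (r.toNat + 1)).map (fun (j : Nat) => pvG (j : Int) r) := by
  have h00 : PySem.List.pyGetD row 0 [] = pvG ((0 : Nat) : Int) (r - 1) := by
    rw [hrow, pyGetD_map_range _ _ 0 (by omega) (by omega)]
    norm_num
  have hneg : pvG (-1) r = [] := by rw [pvG]; simp
  have hG0r : pvG ((0 : Nat) : Int) r = (pvG ((0 : Nat) : Int) (r - 1)).map (fun s => ")" ++ s) := by
    rw [pvG, if_neg (by omega), if_neg (by omega)]
    norm_num [hneg]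
  have base : [(PySem.List.pyGetD row 0 []).map (fun s => ")" ++ s)]
      = (List.range 1).map (fun (j : Nat) => pvG (j : Int) r) := by
    simp only [List.range_one, List.map_cons, List.map_nil]
    rw [h00, hG0r]
  rw [base]
  have h1 := inner_aux r hr row hrow r.toNat 1 (by omega) (by omega)
  simpa using h1

-- the outer loop fills successive rows
lemma outer_loop (count : Int) (hc : 0 ≤ count) : ∀ (d k : Nat), k + d = count.toNat →
    (PySem.List.pyRange ((k : Int) + 1) (count + 1) 1).foldl (fun row r =>
        (PySem.List.pyRange 1 (r + 1) 1).foldl (fun new l =>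
            new ++ [(if l < r then (PySem.List.pyGetD row l []).map (fun s => ")" ++ s) else [])
              ++ (PySem.List.pyGetD new (l - 1) []).map (fun s => "(" ++ s)])
          [(PySem.List.pyGetD row 0 []).map (fun s => ")" ++ s)])
      ((List.range (k + 1)).map (fun (j : Nat) => pvG (j : Int) (k : Int)))
    = (List.range (count.toNat + 1)).map (fun (j : Nat) => pvG (j : Int) count) := by
  intro d
  induction d with
  | zero =>
    intro k hk
    rw [PySem.List.pyRange_one_eq_nil (by omega)]
    simp only [List.foldl_nil]
    have hk2 : k = count.toNat := by omega
    subst hk2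
    rw [Int.toNat_of_nonneg hc]
  | succ d ihd =>
    intro k hk
    rw [PySem.List.pyRange_one_cons (by omega : (k : Int) + 1 < count + 1)]
    simp only [List.foldl_cons]
    have hrow : ((List.range (k + 1)).map (fun (j : Nat) => pvG (j : Int) (k : Int)))
        = (List.range ((k : Int) + 1).toNat).map (fun (j : Nat) => pvG (j : Int) ((k : Int) + 1 - 1)) := by
      have e1 : ((k : Int) + 1).toNat = k + 1 := by omega
      have e2 : (k : Int) + 1 - 1 = (k : Int) := by ring
      rw [e1, e2]
    rw [hrow]
    rw [inner_loop ((k : Int) + 1) (by omega) _ rfl]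
    have e1 : ((k : Int) + 1).toNat = k + 1 := by omega
    rw [e1]
    have h2 := ihd (k + 1) (by omega)
    push_cast at h2 ⊢
    exact h2

-- ===== VERDICT (by name: the statement is the Claim_ definition above) =====
theorem parensBookSolutionIterative_spec : Claim_equal_parensBookSolutionIterative := by
  intro count _
  unfold Spec_parensBookSolutionIterative parensBookSolutionIterative parensBookSolutionIterative_alt
  simp only [loopA_eq_G]
  by_cases hc : count < 0
  · rw [if_pos hc, pvG, if_pos (by omega)]
    simp
  · rw [if_neg hc]
    have h0 := outer_loop count (by omega) count.toNat 0 (by omega)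
    have hG00 : pvG 0 0 = [""] := by rw [pvG]; norm_num
    have hinit : ((List.range (0 + 1)).map (fun (j : Nat) => pvG (j : Int) ((0 : Nat) : Int))) = [[""]] := by
      simp only [zero_add, List.range_one, List.map_cons, List.map_nil, Nat.cast_zero]
      rw [hG00]
    rw [hinit] at h0
    simp only [Nat.cast_zero, zero_add] at h0 ⊢
    rw [h0, pyGetD_map_range _ _ count (by omega) (by omega)]
    have hcast : ((count.toNat : Nat) : Int) = count := by omega
    rw [hcast]
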